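-- pv_equiv track=rewrite | github.com/Mightinity/secureme | main.py | get_cidr
-- ===== SOURCE A (Python) =====
-- usable_hosts_to_cidr = {
--     2: "/30",
--     6: "/29",
--     14: "/28",
--     30: "/27",
--     62: "/26",
--     126: "/25",
--     254: "/24",
--     510: "/23",
--     1022: "/22",
--     2046: "/21",
--     4094: "/20",
--     8190: "/19",
--     16382: "/18",
--     32766: "/17",
--     65534: "/16",
--     131070: "/15",
--     262142: "/14",
--     524286: "/13",
--     1048574: "/12",
--     2097150: "/11",
--     4194302: "/10",
--     8388606: "/9",
--     16777214: "/8"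
-- }
--
-- def get_cidr(usable_hosts):
--     # Cari nilai yang cocok
--     if usable_hosts in usable_hosts_to_cidr:
--         return usable_hosts_to_cidr[usable_hosts]
--     # Jika tidak cocok, cari nilai terdekat di atas
--     sorted_hosts = sorted(usable_hosts_to_cidr.keys())
--     for hosts in sorted_hosts:
--         if usable_hosts < hosts:
--             return usable_hosts_to_cidr[hosts]
--     return "Unknown"  # Jika semua gagal (tidak mungkin terjadi karena batas map)
-- ===== SOURCE B (Python) =====
-- _KEYS = [2, 6, 14, 30, 62, 126, 254, 510, 1022, 2046, 4094, 8190, 16382,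
--          32766, 65534, 131070, 262142, 524286, 1048574, 2097150, 4194302,
--          8388606, 16777214]
-- _CIDRS = ["/30", "/29", "/28", "/27", "/26", "/25", "/24", "/23", "/22",
--           "/21", "/20", "/19", "/18", "/17", "/16", "/15", "/14", "/13",
--           "/12", "/11", "/10", "/9", "/8"]
--
-- def _bisect_left(a, x):
--     lo, hi = 0, len(a)
--     while lo < hi:
--         mid = (lo + hi) // 2
--         if a[mid] < x:
--             lo = mid + 1
--         else:
--             hi = mid
--     return lo
--
-- def get_cidr(usable_hosts):
--     i = _bisect_left(_KEYS, usable_hosts)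
--     return _CIDRS[i] if i < len(_KEYS) else "Unknown"
-- ===== Notes on version B (the rewrite author's own statement) =====
-- stated objective: idiomatic
-- what changed: Replaced A's dict membership test plus per-call sort and linear scan over the keys with a single bisect_left-style binary search over a precomputed sorted key table paired with a parallel CIDR table.
import Mathlib
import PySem

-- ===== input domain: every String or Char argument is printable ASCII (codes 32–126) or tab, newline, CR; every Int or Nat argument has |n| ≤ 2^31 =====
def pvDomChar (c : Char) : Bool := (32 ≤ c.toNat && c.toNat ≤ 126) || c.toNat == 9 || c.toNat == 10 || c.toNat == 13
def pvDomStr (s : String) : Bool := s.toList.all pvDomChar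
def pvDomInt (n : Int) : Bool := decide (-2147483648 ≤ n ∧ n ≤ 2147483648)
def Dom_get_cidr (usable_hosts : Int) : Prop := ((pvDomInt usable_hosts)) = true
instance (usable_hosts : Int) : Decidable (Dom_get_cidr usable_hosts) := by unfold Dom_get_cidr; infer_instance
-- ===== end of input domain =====

-- B replaces A's dict-membership test plus linear scan of the sorted keys by one binary
-- search (bisect_left style) over a precomputed sorted key table with a parallel CIDR table.

-- ===== PORT A =====
-- the module-level dict usable_hosts_to_cidr
def pvTable : PySem.Dict Int String := PySem.Dict.ofList
  [(2, "/30"), (6, "/29"), (14, "/28"), (30, "/27"), (62, "/26"), (126, "/25"), (254, "/24"), (510, "/23"), (1022, "/22"), (2046, "/21"), (4094, "/20"), (8190, "/19"), (16382, "/18"), (32766, "/17"), (65534, "/16"), (131070, "/15"), (262142, "/14"), (524286, "/13"), (1048574, "/12"), (2097150, "/11"), (4194302, "/10"), (8388606, "/9"), (16777214, "/8")]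

-- the 'for hosts in sorted_hosts' loop; usable_hosts_to_cidr[hosts] cannot KeyError here
-- (hosts comes from the dict's own keys), so getD with a dummy default is exact.
def pvLoopA (usable_hosts : Int) : List Int → String
  | [] => "Unknown"  -- Jika semua gagal
  | hosts :: rest =>
      if usable_hosts < hosts then PySem.Dict.getD pvTable hosts ""
      else pvLoopA usable_hosts rest

def get_cidr (usable_hosts : Int) : String :=
  if PySem.Dict.contains pvTable usable_hosts then
    PySem.Dict.getD pvTable usable_hosts ""  -- dict[usable_hosts]; the key is present by the branch
  else
    pvLoopA usable_hosts (PySem.List.sorted (PySem.Dict.keys pvTable) (fun x => x) false)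

-- ===== PORT B =====
def pvKeys : List Int :=
  [2, 6, 14, 30, 62, 126, 254, 510, 1022, 2046, 4094, 8190, 16382, 32766, 65534, 131070, 262142, 524286, 1048574, 2097150, 4194302, 8388606, 16777214]

def pvCidrs : List String :=
  ["/30", "/29", "/28", "/27", "/26", "/25", "/24", "/23", "/22", "/21", "/20", "/19", "/18", "/17", "/16", "/15", "/14", "/13", "/12", "/11", "/10", "/9", "/8"]

-- _bisect_left's while loop; the fuel argument (length+1 at the call site) only makes the
-- loop total — it never runs out, since hi - lo shrinks every iteration.  a[mid] is always
-- in range (lo ≤ mid < hi ≤ len), so getD with a dummy default is exact.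
def pvBL (a : List Int) (x : Int) : Nat → Nat → Nat → Nat
  | 0, lo, _ => lo
  | fuel + 1, lo, hi =>
      if lo < hi then
        if a.getD ((lo + hi) / 2) 0 < x then pvBL a x fuel ((lo + hi) / 2 + 1) hi
        else pvBL a x fuel lo ((lo + hi) / 2)
      else lo

def get_cidr_alt (usable_hosts : Int) : String :=
  let i := pvBL pvKeys usable_hosts (pvKeys.length + 1) 0 pvKeys.length
  if i < pvKeys.length then pvCidrs.getD i "Unknown"  -- _CIDRS[i], in range by the branch
  else "Unknown"

-- ===== PRECONDITION & SPEC =====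
def Spec_get_cidr (usable_hosts : Int) (out : String) : Prop := out = get_cidr_alt usable_hosts
instance (usable_hosts : Int) (out : String) : Decidable (Spec_get_cidr usable_hosts out) := by unfold Spec_get_cidr; infer_instance

-- ===== CLAIM (what is proved, stated in full; the proofs are below) =====
def Claim_equal_get_cidr : Prop := ∀ (usable_hosts : Int), Dom_get_cidr usable_hosts → Spec_get_cidr usable_hosts (get_cidr usable_hosts)

-- ===== LEMMAS AND PROOFS =====

-- sorting the dict's keys yields B's key table (the dict lists its keys in increasing order)
theorem pv_sorted_keys :
    PySem.List.sorted (PySem.Dict.keys pvTable) (fun x => x) false = pvKeys := by decide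

-- B's key table is (non-strictly) monotone, read through getD
theorem pvKeys_mono : ∀ p q : Nat, p ≤ q → q < pvKeys.length →
    pvKeys.getD p 0 ≤ pvKeys.getD q 0 := by
  have hp : pvKeys.Pairwise (· ≤ ·) := by decide
  intro p q hpq hq
  rcases eq_or_lt_of_le hpq with rfl | h
  · exact le_refl _
  · rw [List.getD_eq_getElem _ _ (by omega), List.getD_eq_getElem _ _ hq]
    exact List.pairwise_iff_getElem.mp hp p q (by omega) hq h

-- invariant of the bisect loop: on a monotone list, with enough fuel, it returns the
-- leftmost position r in [lo, hi] with everything before r below x and from r on ≥ x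
theorem pvBL_spec (a : List Int) (x : Int)
    (hsort : ∀ p q : Nat, p ≤ q → q < a.length → a.getD p 0 ≤ a.getD q 0) :
    ∀ (fuel lo hi : Nat), lo ≤ hi → hi ≤ a.length → hi ≤ lo + fuel →
      lo ≤ pvBL a x fuel lo hi ∧ pvBL a x fuel lo hi ≤ hi ∧
      (∀ j, lo ≤ j → j < pvBL a x fuel lo hi → a.getD j 0 < x) ∧
      (∀ j, pvBL a x fuel lo hi ≤ j → j < hi → x ≤ a.getD j 0) := by
  intro fuel
  induction fuel with
  | zero =>
    intro lo hi h1 h2 h3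
    simp only [pvBL]
    exact ⟨le_refl _, by omega, fun j hj1 hj2 => by omega, fun j hj1 hj2 => by omega⟩
  | succ fuel ih =>
    intro lo hi h1 h2 h3
    simp only [pvBL]
    split_ifs with hlt hcmp
    · obtain ⟨ih1, ih2, ih3, ih4⟩ := ih ((lo + hi) / 2 + 1) hi (by omega) h2 (by omega)
      refine ⟨by omega, ih2, ?_, ih4⟩
      intro j hj1 hj2
      by_cases hjm : j ≤ (lo + hi) / 2
      · exact lt_of_le_of_lt (hsort j ((lo + hi) / 2) hjm (by omega)) hcmp
      · exact ih3 j (by omega) hj2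
    · obtain ⟨ih1, ih2, ih3, ih4⟩ := ih lo ((lo + hi) / 2) (by omega) (by omega) (by omega)
      refine ⟨ih1, by omega, ih3, ?_⟩
      intro j hj1 hj2
      by_cases hjm : j < (lo + hi) / 2
      · exact ih4 j hj1 hjm
      · exact le_trans (not_lt.mp hcmp) (hsort ((lo + hi) / 2) j (by omega) (by omega))
    · exact ⟨le_refl _, by omega, fun j hj1 hj2 => by omega, fun j hj1 hj2 => by omega⟩

theorem pv_main (n : Int) : get_cidr n = get_cidr_alt n := by
  unfold get_cidr
  split_ifs with hmc
  · -- exact dict hit: n is one of the 23 keys; check each key by evaluation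
    have hmem : n ∈ PySem.Dict.keys pvTable :=
      (PySem.Dict.contains_iff_mem_keys pvTable n).mp hmc
    rw [show PySem.Dict.keys pvTable = pvKeys from by decide] at hmem
    unfold pvKeys at hmem
    fin_cases hmem <;> decide
  · -- no exact hit: A scans the sorted keys; B's bisect lands on the same entry
    have hmem : n ∉ PySem.Dict.keys pvTable := fun h =>
      hmc ((PySem.Dict.contains_iff_mem_keys pvTable n).mpr h)
    rw [show PySem.Dict.keys pvTable = pvKeys from by decide] at hmem
    unfold pvKeys at hmem
    simp only [List.mem_cons, List.not_mem_nil, or_false, not_or] at hmem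
    obtain ⟨hne0, hne1, hne2, hne3, hne4, hne5, hne6, hne7, hne8, hne9, hne10, hne11, hne12, hne13, hne14, hne15, hne16, hne17, hne18, hne19, hne20, hne21, hne22⟩ := hmem
    rw [pv_sorted_keys]
    simp only [get_cidr_alt]
    rw [show pvKeys.length = 23 from rfl]
    obtain ⟨hlo, hhi, hA, hB⟩ :=
      pvBL_spec pvKeys n pvKeys_mono (23 + 1) 0 23 (by omega) (by decide) (by omega)
    set r := pvBL pvKeys n (23 + 1) 0 23 with hrdef
    simp only [pvLoopA, pvKeys]
    by_cases c0 : n < 2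
    · rw [if_pos c0]
      have hreq : r = 0 := by
        rcases Nat.eq_zero_or_pos r with h | h
        · exact h
        · exfalso
          have ha := hA 0 (by omega) (by omega)
          rw [show pvKeys.getD 0 0 = 2 from rfl] at ha
          omega
      rw [hreq]
      decide
    · rw [if_neg c0]
      by_cases c1 : n < 6
      · rw [if_pos c1]
        have hreq : r = 1 := by
          rcases Nat.lt_trichotomy r 1 with h | h | h
          · exfalso
            have hb := hB 0 (by omega) (by omega)
            rw [show pvKeys.getD 0 0 = 2 from rfl] at hb
            omega
          · exact h
          · exfalso
            have ha := hA 1 (by omega) (by omega)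
            rw [show pvKeys.getD 1 0 = 6 from rfl] at ha
            omega
        rw [hreq]
        decide
      · rw [if_neg c1]
        by_cases c2 : n < 14
        · rw [if_pos c2]
          have hreq : r = 2 := by
            rcases Nat.lt_trichotomy r 2 with h | h | h
            · exfalso
              have hb := hB 1 (by omega) (by omega)
              rw [show pvKeys.getD 1 0 = 6 from rfl] at hb
              omega
            · exact h
            · exfalso
              have ha := hA 2 (by omega) (by omega)
              rw [show pvKeys.getD 2 0 = 14 from rfl] at ha
              omega
          rw [hreq]
          decide
        · rw [if_neg c2]
          by_cases c3 : n < 30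
          · rw [if_pos c3]
            have hreq : r = 3 := by
              rcases Nat.lt_trichotomy r 3 with h | h | h
              · exfalso
                have hb := hB 2 (by omega) (by omega)
                rw [show pvKeys.getD 2 0 = 14 from rfl] at hb
                omega
              · exact h
              · exfalso
                have ha := hA 3 (by omega) (by omega)
                rw [show pvKeys.getD 3 0 = 30 from rfl] at ha
                omega
            rw [hreq]
            decide
          · rw [if_neg c3]
            by_cases c4 : n < 62
            · rw [if_pos c4]
              have hreq : r = 4 := by
                rcases Nat.lt_trichotomy r 4 with h | h | h
                · exfalso
                  have hb := hB 3 (by omega) (by omega)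
                  rw [show pvKeys.getD 3 0 = 30 from rfl] at hb
                  omega
                · exact h
                · exfalso
                  have ha := hA 4 (by omega) (by omega)
                  rw [show pvKeys.getD 4 0 = 62 from rfl] at ha
                  omega
              rw [hreq]
              decide
            · rw [if_neg c4]
              by_cases c5 : n < 126
              · rw [if_pos c5]
                have hreq : r = 5 := by
                  rcases Nat.lt_trichotomy r 5 with h | h | h
                  · exfalso
                    have hb := hB 4 (by omega) (by omega)
                    rw [show pvKeys.getD 4 0 = 62 from rfl] at hb
                    omega
                  · exact h
                  · exfalso
                    have ha := hA 5 (by omega) (by omega)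
                    rw [show pvKeys.getD 5 0 = 126 from rfl] at ha
                    omega
                rw [hreq]
                decide
              · rw [if_neg c5]
                by_cases c6 : n < 254
                · rw [if_pos c6]
                  have hreq : r = 6 := by
                    rcases Nat.lt_trichotomy r 6 with h | h | h
                    · exfalso
                      have hb := hB 5 (by omega) (by omega)
                      rw [show pvKeys.getD 5 0 = 126 from rfl] at hb
                      omega
                    · exact h
                    · exfalso
                      have ha := hA 6 (by omega) (by omega)
                      rw [show pvKeys.getD 6 0 = 254 from rfl] at ha
                      omega
                  rw [hreq]
                  decide
                · rw [if_neg c6]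
                  by_cases c7 : n < 510
                  · rw [if_pos c7]
                    have hreq : r = 7 := by
                      rcases Nat.lt_trichotomy r 7 with h | h | h
                      · exfalso
                        have hb := hB 6 (by omega) (by omega)
                        rw [show pvKeys.getD 6 0 = 254 from rfl] at hb
                        omega
                      · exact h
                      · exfalso
                        have ha := hA 7 (by omega) (by omega)
                        rw [show pvKeys.getD 7 0 = 510 from rfl] at ha
                        omega
                    rw [hreq]
                    decide
                  · rw [if_neg c7]
                    by_cases c8 : n < 1022
                    · rw [if_pos c8]
                      have hreq : r = 8 := by
                        rcases Nat.lt_trichotomy r 8 with h | h | h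
                        · exfalso
                          have hb := hB 7 (by omega) (by omega)
                          rw [show pvKeys.getD 7 0 = 510 from rfl] at hb
                          omega
                        · exact h
                        · exfalso
                          have ha := hA 8 (by omega) (by omega)
                          rw [show pvKeys.getD 8 0 = 1022 from rfl] at ha
                          omega
                      rw [hreq]
                      decide
                    · rw [if_neg c8]
                      by_cases c9 : n < 2046
                      · rw [if_pos c9]
                        have hreq : r = 9 := by
                          rcases Nat.lt_trichotomy r 9 with h | h | h
                          · exfalso
                            have hb := hB 8 (by omega) (by omega)
                            rw [show pvKeys.getD 8 0 = 1022 from rfl] at hb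
                            omega
                          · exact h
                          · exfalso
                            have ha := hA 9 (by omega) (by omega)
                            rw [show pvKeys.getD 9 0 = 2046 from rfl] at ha
                            omega
                        rw [hreq]
                        decide
                      · rw [if_neg c9]
                        by_cases c10 : n < 4094
                        · rw [if_pos c10]
                          have hreq : r = 10 := by
                            rcases Nat.lt_trichotomy r 10 with h | h | h
                            · exfalso
                              have hb := hB 9 (by omega) (by omega)
                              rw [show pvKeys.getD 9 0 = 2046 from rfl] at hb
                              omega
                            · exact h
                            · exfalso
                              have ha := hA 10 (by omega) (by omega)
                              rw [show pvKeys.getD 10 0 = 4094 from rfl] at ha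
                              omega
                          rw [hreq]
                          decide
                        · rw [if_neg c10]
                          by_cases c11 : n < 8190
                          · rw [if_pos c11]
                            have hreq : r = 11 := by
                              rcases Nat.lt_trichotomy r 11 with h | h | h
                              · exfalso
                                have hb := hB 10 (by omega) (by omega)
                                rw [show pvKeys.getD 10 0 = 4094 from rfl] at hb
                                omega
                              · exact h
                              · exfalso
                                have ha := hA 11 (by omega) (by omega)
                                rw [show pvKeys.getD 11 0 = 8190 from rfl] at ha
                                omega
                            rw [hreq]
                            decide
                          · rw [if_neg c11]
                            by_cases c12 : n < 16382
                            · rw [if_pos c12]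
                              have hreq : r = 12 := by
                                rcases Nat.lt_trichotomy r 12 with h | h | h
                                · exfalso
                                  have hb := hB 11 (by omega) (by omega)
                                  rw [show pvKeys.getD 11 0 = 8190 from rfl] at hb
                                  omega
                                · exact h
                                · exfalso
                                  have ha := hA 12 (by omega) (by omega)
                                  rw [show pvKeys.getD 12 0 = 16382 from rfl] at ha
                                  omega
                              rw [hreq]
                              decide
                            · rw [if_neg c12]
                              by_cases c13 : n < 32766
                              · rw [if_pos c13]
                                have hreq : r = 13 := by
                                  rcases Nat.lt_trichotomy r 13 with h | h | h
                                  · exfalso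
                                    have hb := hB 12 (by omega) (by omega)
                                    rw [show pvKeys.getD 12 0 = 16382 from rfl] at hb
                                    omega
                                  · exact h
                                  · exfalso
                                    have ha := hA 13 (by omega) (by omega)
                                    rw [show pvKeys.getD 13 0 = 32766 from rfl] at ha
                                    omega
                                rw [hreq]
                                decide
                              · rw [if_neg c13]
                                by_cases c14 : n < 65534
                                · rw [if_pos c14]
                                  have hreq : r = 14 := by
                                    rcases Nat.lt_trichotomy r 14 with h | h | h
                                    · exfalso
                                      have hb := hB 13 (by omega) (by omega)
                                      rw [show pvKeys.getD 13 0 = 32766 from rfl] at hb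
                                      omega
                                    · exact h
                                    · exfalso
                                      have ha := hA 14 (by omega) (by omega)
                                      rw [show pvKeys.getD 14 0 = 65534 from rfl] at ha
                                      omega
                                  rw [hreq]
                                  decide
                                · rw [if_neg c14]
                                  by_cases c15 : n < 131070
                                  · rw [if_pos c15]
                                    have hreq : r = 15 := by
                                      rcases Nat.lt_trichotomy r 15 with h | h | h
                                      · exfalso
                                        have hb := hB 14 (by omega) (by omega)
                                        rw [show pvKeys.getD 14 0 = 65534 from rfl] at hb
                                        omega
                                      · exact h
                                      · exfalso
                                        have ha := hA 15 (by omega) (by omega)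
                                        rw [show pvKeys.getD 15 0 = 131070 from rfl] at ha
                                        omega
                                    rw [hreq]
                                    decide
                                  · rw [if_neg c15]
                                    by_cases c16 : n < 262142
                                    · rw [if_pos c16]
                                      have hreq : r = 16 := by
                                        rcases Nat.lt_trichotomy r 16 with h | h | h
                                        · exfalso
                                          have hb := hB 15 (by omega) (by omega)
                                          rw [show pvKeys.getD 15 0 = 131070 from rfl] at hb
                                          omega
                                        · exact h
                                        · exfalso
                                          have ha := hA 16 (by omega) (by omega)
                                          rw [show pvKeys.getD 16 0 = 262142 from rfl] at ha
                                          omega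
                                      rw [hreq]
                                      decide
                                    · rw [if_neg c16]
                                      by_cases c17 : n < 524286
                                      · rw [if_pos c17]
                                        have hreq : r = 17 := by
                                          rcases Nat.lt_trichotomy r 17 with h | h | h
                                          · exfalso
                                            have hb := hB 16 (by omega) (by omega)
                                            rw [show pvKeys.getD 16 0 = 262142 from rfl] at hb
                                            omega
                                          · exact h
                                          · exfalso
                                            have ha := hA 17 (by omega) (by omega)
                                            rw [show pvKeys.getD 17 0 = 524286 from rfl] at ha
                                            omega
                                        rw [hreq]
                                        decide
                                      · rw [if_neg c17]
                                        by_cases c18 : n < 1048574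
                                        · rw [if_pos c18]
                                          have hreq : r = 18 := by
                                            rcases Nat.lt_trichotomy r 18 with h | h | h
                                            · exfalso
                                              have hb := hB 17 (by omega) (by omega)
                                              rw [show pvKeys.getD 17 0 = 524286 from rfl] at hb
                                              omega
                                            · exact h
                                            · exfalso
                                              have ha := hA 18 (by omega) (by omega)
                                              rw [show pvKeys.getD 18 0 = 1048574 from rfl] at ha
                                              omega
                                          rw [hreq]
                                          decide
                                        · rw [if_neg c18]
                                          by_cases c19 : n < 2097150
                                          · rw [if_pos c19]
                                            have hreq : r = 19 := by
                                              rcases Nat.lt_trichotomy r 19 with h | h | h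
                                              · exfalso
                                                have hb := hB 18 (by omega) (by omega)
                                                rw [show pvKeys.getD 18 0 = 1048574 from rfl] at hb
                                                omega
                                              · exact h
                                              · exfalso
                                                have ha := hA 19 (by omega) (by omega)
                                                rw [show pvKeys.getD 19 0 = 2097150 from rfl] at ha
                                                omega
                                            rw [hreq]
                                            decide
                                          · rw [if_neg c19]
                                            by_cases c20 : n < 4194302
                                            · rw [if_pos c20]
                                              have hreq : r = 20 := by
                                                rcases Nat.lt_trichotomy r 20 with h | h | h
                                                · exfalso
                                                  have hb := hB 19 (by omega) (by omega)
                                                  rw [show pvKeys.getD 19 0 = 2097150 from rfl] at hb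
                                                  omega
                                                · exact h
                                                · exfalso
                                                  have ha := hA 20 (by omega) (by omega)
                                                  rw [show pvKeys.getD 20 0 = 4194302 from rfl] at ha
                                                  omega
                                              rw [hreq]
                                              decide
                                            · rw [if_neg c20]
                                              by_cases c21 : n < 8388606
                                              · rw [if_pos c21]
                                                have hreq : r = 21 := by
                                                  rcases Nat.lt_trichotomy r 21 with h | h | h
                                                  · exfalso
                                                    have hb := hB 20 (by omega) (by omega)
                                                    rw [show pvKeys.getD 20 0 = 4194302 from rfl] at hb
                                                    omega
                                                  · exact h
                                                  · exfalso
                                                    have ha := hA 21 (by omega) (by omega)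
                                                    rw [show pvKeys.getD 21 0 = 8388606 from rfl] at ha
                                                    omega
                                                rw [hreq]
                                                decide
                                              · rw [if_neg c21]
                                                by_cases c22 : n < 16777214
                                                · rw [if_pos c22]
                                                  have hreq : r = 22 := by
                                                    rcases Nat.lt_trichotomy r 22 with h | h | h
                                                    · exfalso
                                                      have hb := hB 21 (by omega) (by omega)
                                                      rw [show pvKeys.getD 21 0 = 8388606 from rfl] at hb
                                                      omega
                                                    · exact h
                                                    · exfalso
                                                      have ha := hA 22 (by omega) (by omega)
                                                      rw [show pvKeys.getD 22 0 = 16777214 from rfl] at ha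
                                                      omega
                                                  rw [hreq]
                                                  decide
                                                · rw [if_neg c22]
                                                  have hreq : r = 23 := by
                                                    rcases Nat.lt_trichotomy r 23 with h | h | h
                                                    · exfalso
                                                      have hb := hB 22 (by omega) (by omega)
                                                      rw [show pvKeys.getD 22 0 = 16777214 from rfl] at hb
                                                      omega
                                                    · exact h
                                                    · omega
                                                  rw [hreq]
                                                  decide

-- ===== VERDICT (by name: the statement is the Claim_ definition above) =====
theorem get_cidr_spec : Claim_equal_get_cidr := by
  intro n _
  unfold Spec_get_cidr
  exact pv_main n
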